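-- pv_equiv track=rewrite | github.com/rajat844/Leetcode2022 | 2195-append-k-integers-with-minimal-sum/2195-append-k-integers-with-minimal-sum.py | minimalKSum
-- ===== SOURCE A (Python) =====
-- from typing import List
--
-- def minimalKSum(nums: List[int], k: int) -> int:
--     ans = (k*(k+1))//2
--     st = set()
--     cnt = 0
--
--     for x in nums:
--         if x not in st and x <= k:
--             ans -= x
--             cnt += 1
--         st.add(x)
--
--     while cnt > 0:
--         if k+1 not in st:
--             ans += k+1
--             cnt -= 1
--         k = k+1
--
--     return ans
-- ===== SOURCE B (Python) =====
-- def minimalKSum(nums, k):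
--     ans = k * (k + 1) // 2
--     vals = sorted(set(nums))
--     remaining = 0
--     cur = k + 1
--     for v in vals:
--         if v <= k:
--             ans -= v
--             remaining += 1
--     for v in vals:
--         if v <= k:
--             continue
--         if remaining == 0:
--             break
--         t = min(remaining, v - cur)
--         ans += t * cur + t * (t - 1) // 2
--         remaining -= t
--         cur = v + 1
--     ans += remaining * cur + remaining * (remaining - 1) // 2
--     return ans
-- ===== Notes on version B (the rewrite author's own statement) =====
-- stated objective: alternative
-- what changed: A probes candidate integers one at a time (k+1, k+2, ...) against a hash set until enough replacements are found; B sorts the distinct values once and sweeps the gaps between consecutive sorted values, adding whole arithmetic-series blocks at once.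
import Mathlib
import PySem

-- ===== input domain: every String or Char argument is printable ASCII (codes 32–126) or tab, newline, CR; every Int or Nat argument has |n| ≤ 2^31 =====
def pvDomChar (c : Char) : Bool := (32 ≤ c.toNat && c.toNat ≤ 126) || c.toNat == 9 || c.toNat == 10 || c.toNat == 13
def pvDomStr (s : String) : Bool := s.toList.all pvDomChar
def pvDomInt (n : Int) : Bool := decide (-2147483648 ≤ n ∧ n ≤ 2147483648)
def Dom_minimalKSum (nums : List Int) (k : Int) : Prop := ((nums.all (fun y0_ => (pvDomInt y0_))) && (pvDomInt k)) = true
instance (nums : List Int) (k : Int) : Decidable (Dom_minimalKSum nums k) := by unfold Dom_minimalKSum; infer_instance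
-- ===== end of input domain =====

-- B replaces A's one-integer-at-a-time replacement loop by a sort-and-gap-sweep with
-- arithmetic-series sums (objective: alternative; same observable behaviour everywhere).

-- ===== PORT A =====
-- the 'while cnt > 0' loop of A: k advances by 1 each iteration, replacements k+1 ∉ st are taken
def minimalKSumWhile (st : PySem.Set Int) (cnt k ans : Int) : Int :=
  if h : 0 < cnt then
    if hm : (k + 1) ∉ st then
      minimalKSumWhile st (cnt - 1) (k + 1) (ans + (k + 1))
    else
      minimalKSumWhile st cnt (k + 1) ans
  else ans
termination_by cnt.toNat + (st.filter (fun x => decide (k < x))).length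
decreasing_by
  · have h1 : (st.filter (fun x => decide (k + 1 < x))).length ≤ (st.filter (fun x => decide (k < x))).length := by
      rw [← List.countP_eq_length_filter, ← List.countP_eq_length_filter]
      exact List.countP_mono_left (by intro x _ hx; simp at hx ⊢; omega)
    omega
  · have hmem : (k + 1) ∈ st.filter (fun x => decide (k < x)) := by
      simp at hm; simp [List.mem_filter, hm]
    have h2 : (st.filter (fun x => decide (k + 1 < x))).length < (st.filter (fun x => decide (k < x))).length := by
      have hsub : st.filter (fun x => decide (k + 1 < x))
          = (st.filter (fun x => decide (k < x))).filter (fun x => decide (k + 1 < x)) := by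
        rw [List.filter_filter]
        apply List.filter_congr
        intro x _; simp; omega
      rw [hsub]
      have := List.length_filter_le (fun x => decide (k + 1 < x)) (st.filter (fun x => decide (k < x)))
      rcases List.mem_iff_append.mp hmem with ⟨pre, post, hps⟩
      rw [hps]
      simp only [List.filter_append, List.length_append, List.filter_cons]
      simp only [decide_eq_false (by omega : ¬ (k + 1 < k + 1)), List.length_cons,
        Bool.false_eq_true, if_false]
      have a1 := List.length_filter_le (fun x => decide (k + 1 < x)) pre
      have a2 := List.length_filter_le (fun x => decide (k + 1 < x)) post
      omega
    omega

def minimalKSum (nums : List Int) (k : Int) : Int :=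
  let ans := PySem.Int.floordiv (k * (k + 1)) 2
  let s := nums.foldl
    (fun (acc : Int × PySem.Set Int × Int) x =>
      if x ∉ acc.2.1 ∧ x ≤ k then (acc.1 - x, PySem.Set.add acc.2.1 x, acc.2.2 + 1)
      else (acc.1, PySem.Set.add acc.2.1 x, acc.2.2))
    (ans, PySem.Set.empty, 0)
  minimalKSumWhile s.2.1 s.2.2 k s.1

-- ===== PORT B =====
-- B's sweep loop over the sorted distinct values (continue on v ≤ k, break on remaining == 0);
-- returns the final (remaining, cur, ans) state
def minimalKSumSweep (k : Int) : List Int → Int → Int → Int → Int × Int × Int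
  | [], remaining, cur, ans => (remaining, cur, ans)
  | v :: vs, remaining, cur, ans =>
    if v ≤ k then minimalKSumSweep k vs remaining cur ans
    else if remaining == 0 then (remaining, cur, ans)
    else
      let t := min remaining (v - cur)
      minimalKSumSweep k vs (remaining - t) (v + 1)
        (ans + t * cur + PySem.Int.floordiv (t * (t - 1)) 2)

def minimalKSum_alt (nums : List Int) (k : Int) : Int :=
  let ans := PySem.Int.floordiv (k * (k + 1)) 2
  let vals := PySem.List.sorted (PySem.Set.ofList nums) (fun x => x) false
  let p := vals.foldl (fun (acc : Int × Int) v => if v ≤ k then (acc.1 - v, acc.2 + 1) else acc) (ans, 0)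
  let r := minimalKSumSweep k vals p.2 (k + 1) p.1
  r.2.2 + r.1 * r.2.1 + PySem.Int.floordiv (r.1 * (r.1 - 1)) 2

-- ===== PRECONDITION & SPEC =====
def Spec_minimalKSum (nums : List Int) (k : Int) (out : Int) : Prop := out = minimalKSum_alt nums k
instance (nums : List Int) (k : Int) (out : Int) : Decidable (Spec_minimalKSum nums k out) := by unfold Spec_minimalKSum; infer_instance

-- ===== CLAIM (what is proved, stated in full; the proofs are below) =====
def Claim_equal_minimalKSum : Prop := ∀ (nums : List Int) (k : Int), Dom_minimalKSum nums k → Spec_minimalKSum nums k (minimalKSum nums k)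

-- ===== LEMMAS AND PROOFS =====

lemma while_zero (st : PySem.Set Int) (cnt k ans : Int) (h : ¬ 0 < cnt) :
    minimalKSumWhile st cnt k ans = ans := by
  rw [minimalKSumWhile]; simp [h]

lemma while_take (st : PySem.Set Int) (cnt k ans : Int) (h : 0 < cnt) (hm : (k + 1) ∉ st) :
    minimalKSumWhile st cnt k ans = minimalKSumWhile st (cnt - 1) (k + 1) (ans + (k + 1)) := by
  rw [minimalKSumWhile]; simp [h, hm]

lemma while_skip (st : PySem.Set Int) (cnt k ans : Int) (hm : (k + 1) ∈ st) :
    minimalKSumWhile st cnt k ans = minimalKSumWhile st cnt (k + 1) ans := by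
  by_cases h : 0 < cnt
  · rw [minimalKSumWhile]; simp [h, hm]
  · rw [while_zero st cnt k ans h, while_zero st cnt (k + 1) ans h]

-- the sum of t consecutive integers starting at c (what B's closed form stands for)
def gapSum (c : Int) : Nat → Int
  | 0 => 0
  | t + 1 => c + gapSum (c + 1) t

lemma gapSum_succ (c : Int) (t : Nat) : gapSum c (t + 1) = c + gapSum (c + 1) t := rfl

lemma gapSum_closed (c : Int) (t : Nat) :
    (t : Int) * c + PySem.Int.floordiv ((t : Int) * ((t : Int) - 1)) 2 = gapSum c t := by
  have h2 : (2 : Int) * (gapSum c t - (t : Int) * c) = (t : Int) * ((t : Int) - 1) := by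
    induction t generalizing c with
    | zero => simp [gapSum]
    | succ n ih =>
      rw [gapSum_succ]
      have := ih (c + 1)
      push_cast at this ⊢
      linarith
  have : (t : Int) * ((t : Int) - 1) = 2 * (gapSum c t - (t : Int) * c) := h2.symm
  rw [this, PySem.Int.floordiv_eq_ediv_of_pos (by omega), Int.mul_ediv_cancel_left _ (by omega)]
  ring

-- gap lemma: t consecutive replacement candidates k+1..k+t, none in st, are all taken
lemma while_gap (st : PySem.Set Int) (t : Nat) :
    ∀ (cnt k ans : Int), (t : Int) ≤ cnt →
    (∀ j, k < j → j ≤ k + (t : Int) → j ∉ st) →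
    minimalKSumWhile st cnt k ans
      = minimalKSumWhile st (cnt - (t : Int)) (k + (t : Int)) (ans + gapSum (k + 1) t) := by
  induction t with
  | zero => intro cnt k ans _ _; simp [gapSum]
  | succ n ih =>
    intro cnt k ans hle hnone
    have hnm : (k + 1) ∉ st := hnone (k + 1) (by omega) (by push_cast; omega)
    rw [while_take st cnt k ans (by push_cast at hle; omega) hnm]
    rw [ih (cnt - 1) (k + 1) (ans + (k + 1)) (by push_cast at hle ⊢; omega)
        (by intro j h1 h2; exact hnone j (by omega) (by push_cast at h2 ⊢; omega))]
    rw [gapSum_succ]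
    congr 1 <;> push_cast <;> ring

-- membership facts about A's growing set
lemma newf_mem (st : PySem.Set Int) (x : Int) (L : List Int) (hx : x ∈ st) :
    List.filter (fun y => !(PySem.Set.contains st y)) (PySem.Set.ofList (x :: L))
    = List.filter (fun y => !(PySem.Set.contains st y)) (PySem.Set.ofList L) := by
  rw [PySem.Set.ofList_cons]
  have hx' : (!(PySem.Set.contains st x)) = false := by simp [PySem.Set.contains, hx]
  rw [List.filter_cons_of_neg (p := fun y => !(PySem.Set.contains st y)) (a := x)
    (l := (PySem.Set.ofList L).discard x) (by simp only [hx']; simp)]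
  simp only [PySem.Set.discard, List.filter_filter]
  apply List.filter_congr
  intro y _
  by_cases hyx : y = x
  · subst hyx; simp [PySem.Set.contains, hx]
  · simp [hyx]

lemma newf_not_mem (st : PySem.Set Int) (x : Int) (L : List Int) (hx : x ∉ st) :
    List.filter (fun y => !(PySem.Set.contains st y)) (PySem.Set.ofList (x :: L))
    = x :: List.filter (fun y => !(PySem.Set.contains (st ++ [x]) y)) (PySem.Set.ofList L) := by
  rw [PySem.Set.ofList_cons]
  have hx' : (!(PySem.Set.contains st x)) = true := by simp [PySem.Set.contains, hx]
  rw [List.filter_cons_of_pos (p := fun y => !(PySem.Set.contains st y)) (a := x)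
    (l := (PySem.Set.ofList L).discard x) hx']
  congr 1
  simp only [PySem.Set.discard, List.filter_filter]
  apply List.filter_congr
  intro y _
  by_cases hyx : y = x
  · subst hyx; simp [PySem.Set.contains]
  · simp [PySem.Set.contains, hyx]

-- main loop correspondence: A's while loop equals B's sweep + trailing series
lemma sweep_main (k : Int) (st : PySem.Set Int) : ∀ (vs : List Int) (rem cur ans : Int),
    vs.Pairwise (· < ·) →
    (∀ v ∈ vs, v ∈ st) →
    (∀ x ∈ st, cur ≤ x → x ∈ vs) →
    0 ≤ rem → k + 1 ≤ cur →
    (∀ v ∈ vs, k < v → cur ≤ v) →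
    minimalKSumWhile st rem (cur - 1) ans
      = (minimalKSumSweep k vs rem cur ans).2.2
        + (minimalKSumSweep k vs rem cur ans).1 * (minimalKSumSweep k vs rem cur ans).2.1
        + PySem.Int.floordiv ((minimalKSumSweep k vs rem cur ans).1 * ((minimalKSumSweep k vs rem cur ans).1 - 1)) 2 := by
  intro vs
  induction vs with
  | nil =>
    intro rem cur ans _ _ hcover hrem hcur _
    rw [minimalKSumSweep]
    have htc : ((rem.toNat : Int)) = rem := Int.toNat_of_nonneg hrem
    have hgap := while_gap st rem.toNat rem (cur - 1) ans (by omega)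
      (by intro j h1 h2 hj
          exact absurd (hcover j hj (by omega)) (List.not_mem_nil))
    rw [hgap, while_zero _ _ _ _ (by omega)]
    have hc : cur - 1 + 1 = cur := by ring
    rw [hc]
    have := gapSum_closed cur rem.toNat
    rw [htc] at this
    rw [← this]
    ring
  | cons v vs ih =>
    intro rem cur ans hpw hsub hcover hrem hcur hgap
    have hvst : v ∈ st := hsub v (List.mem_cons_self ..)
    by_cases hv : v ≤ k
    · have hstep : minimalKSumSweep k (v :: vs) rem cur ans = minimalKSumSweep k vs rem cur ans := by
        rw [minimalKSumSweep]; simp [hv]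
      rw [hstep]
      refine ih rem cur ans hpw.of_cons (fun w hw => hsub w (List.mem_cons_of_mem _ hw))
        (fun x hx hcx => ?_) hrem hcur
        (fun w hw hkw => hgap w (List.mem_cons_of_mem _ hw) hkw)
      rcases List.mem_cons.mp (hcover x hx hcx) with h | h
      · exact absurd hcx (by rw [h]; omega)
      · exact h
    · have hkv : k < v := by omega
      have hcv : cur ≤ v := hgap v (List.mem_cons_self ..) hkv
      by_cases hr0 : rem = 0
      · subst hr0
        have hstep : minimalKSumSweep k (v :: vs) 0 cur ans = (0, cur, ans) := by
          rw [minimalKSumSweep]; simp [hv]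
        rw [hstep, while_zero _ _ _ _ (by omega)]
        have h0 : PySem.Int.floordiv ((0:Int) * ((0:Int) - 1)) 2 = 0 := by decide
        simp only [h0]
        ring
      · have hrpos : 0 < rem := by omega
        have htdef : (0:Int) ≤ min rem (v - cur) := by omega
        set t : Int := min rem (v - cur) with ht
        have htv : t ≤ v - cur := by omega
        have htr : t ≤ rem := by omega
        have htc : ((t.toNat : Int)) = t := Int.toNat_of_nonneg htdef
        have hgapl := while_gap st t.toNat rem (cur - 1) ans (by omega)
          (by intro j h1 h2 hj
              have hj' : cur ≤ j := by omega
              have hjv : j < v := by omega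
              rcases List.mem_cons.mp (hcover j hj hj') with h | h
              · omega
              · have : v < j := (List.pairwise_cons.mp hpw).1 j h
                omega)
        rw [hgapl]
        have hbridge : ∀ A : Int, minimalKSumWhile st (rem - t.toNat) (cur - 1 + t.toNat) A
            = minimalKSumWhile st (rem - t) v A := by
          intro A
          rw [htc]
          by_cases hz : rem - t = 0
          · rw [while_zero _ _ _ _ (by omega), while_zero _ _ _ _ (by omega)]
          · have hc : cur - 1 + t = v - 1 := by omega
            rw [hc]
            have hv' : v - 1 + 1 ∈ st := by
              rw [show v - 1 + 1 = v from by ring]; exact hvst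
            have hs := while_skip st (rem - t) (v - 1) A hv'
            rw [show v - 1 + 1 = v from by ring] at hs
            exact hs
        have hstep : minimalKSumSweep k (v :: vs) rem cur ans
            = minimalKSumSweep k vs (rem - t) (v + 1)
                (ans + t * cur + PySem.Int.floordiv (t * (t - 1)) 2) := by
          rw [minimalKSumSweep]
          simp only [if_neg hv, beq_iff_eq, if_neg hr0, ← ht]
        have hclosed := gapSum_closed cur t.toNat
        rw [htc] at hclosed
        have hans : ans + gapSum cur t.toNat = ans + t * cur + PySem.Int.floordiv (t * (t - 1)) 2 := by
          rw [← hclosed]; ring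
        rw [show cur - 1 + 1 = cur from by ring]
        rw [hbridge (ans + gapSum cur t.toNat), hans, hstep]
        have ihx := ih (rem - t) (v + 1) (ans + t * cur + PySem.Int.floordiv (t * (t - 1)) 2)
          hpw.of_cons (fun w hw => hsub w (List.mem_cons_of_mem _ hw))
          (fun x hx hcx => by
            rcases List.mem_cons.mp (hcover x hx (by omega)) with h | h
            · exact absurd hcx (by rw [h]; omega)
            · exact h)
          (by omega) (by omega)
          (fun w hw _ => by
            have : v < w := (List.pairwise_cons.mp hpw).1 w hw
            omega)
        rw [show v + 1 - 1 = v from by ring] at ihx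
        exact ihx

-- characterisation of A's accumulation pass
lemma fold_A (k : Int) : ∀ (nums : List Int) (st : PySem.Set Int) (ans cnt : Int),
    nums.foldl
      (fun (acc : Int × PySem.Set Int × Int) x =>
        if x ∉ acc.2.1 ∧ x ≤ k then (acc.1 - x, PySem.Set.add acc.2.1 x, acc.2.2 + 1)
        else (acc.1, PySem.Set.add acc.2.1 x, acc.2.2))
      (ans, st, cnt)
    = (ans - (((PySem.Set.ofList nums).filter (fun y => !(PySem.Set.contains st y))).filter (fun x => decide (x ≤ k))).sum,
       PySem.Set.update st nums,
       cnt + ((((PySem.Set.ofList nums).filter (fun y => !(PySem.Set.contains st y))).filter (fun x => decide (x ≤ k))).length : Int)) := by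
  intro nums
  induction nums with
  | nil => intro st ans cnt; simp [PySem.Set.ofList, PySem.Set.update, PySem.Set.empty]
  | cons x xs ih =>
    intro st ans cnt
    rw [List.foldl_cons]
    have hupd : PySem.Set.update st (x :: xs) = PySem.Set.update (PySem.Set.add st x) xs := rfl
    by_cases hx : x ∈ st
    · have hcond : ¬ (x ∉ st ∧ x ≤ k) := by tauto
      rw [if_neg hcond]
      rw [ih (PySem.Set.add st x) ans cnt, hupd, PySem.Set.add_of_mem hx, newf_mem st x xs hx]
    · have hadd : PySem.Set.add st x = st ++ [x] := PySem.Set.add_of_not_mem hx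
      have hnew := newf_not_mem st x xs hx
      by_cases hxk : x ≤ k
      · rw [if_pos ⟨hx, hxk⟩]
        rw [ih (PySem.Set.add st x) (ans - x) (cnt + 1), hupd, hadd, hnew,
          List.filter_cons_of_pos (p := fun y => decide (y ≤ k)) (a := x)
            (l := List.filter (fun y => !(PySem.Set.contains (st ++ [x]) y)) (PySem.Set.ofList xs))
            (by simp [hxk])]
        simp only [Prod.mk.injEq, List.sum_cons, List.length_cons]
        refine ⟨by ring, trivial, by push_cast; ring⟩
      · rw [if_neg (by tauto)]
        rw [ih (PySem.Set.add st x) ans cnt, hupd, hadd, hnew,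
          List.filter_cons_of_neg (p := fun y => decide (y ≤ k)) (a := x)
            (l := List.filter (fun y => !(PySem.Set.contains (st ++ [x]) y)) (PySem.Set.ofList xs))
            (by simp [hxk])]

-- characterisation of B's accumulation pass
lemma fold_B (k : Int) : ∀ (vals : List Int) (ans cnt : Int),
    vals.foldl (fun (acc : Int × Int) v => if v ≤ k then (acc.1 - v, acc.2 + 1) else acc) (ans, cnt)
    = (ans - (vals.filter (fun x => decide (x ≤ k))).sum,
       cnt + ((vals.filter (fun x => decide (x ≤ k))).length : Int)) := by
  intro vals
  induction vals with
  | nil => intro ans cnt; simp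
  | cons v vs ih =>
    intro ans cnt
    by_cases hv : v ≤ k
    · simp only [List.foldl_cons, if_pos hv, ih, List.filter_cons, decide_eq_true hv, if_true]
      rw [Prod.mk.injEq, List.sum_cons, List.length_cons]
      constructor <;> push_cast <;> ring
    · simp only [List.foldl_cons, if_neg hv, ih, List.filter_cons]
      simp [hv]

-- ===== VERDICT (by name: the statement is the Claim_ definition above) =====
lemma empty_filter_id (l : List Int) :
    List.filter (fun y => !(PySem.Set.contains PySem.Set.empty y)) l = l := by
  simp [PySem.Set.contains, PySem.Set.empty]

lemma empty_update (l : List Int) :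
    PySem.Set.update PySem.Set.empty l = PySem.Set.ofList l := rfl

theorem minimalKSum_spec : Claim_equal_minimalKSum := by
  intro nums k _
  unfold Spec_minimalKSum minimalKSum minimalKSum_alt
  dsimp only
  rw [fold_A k nums PySem.Set.empty (PySem.Int.floordiv (k * (k + 1)) 2) 0,
      fold_B k (PySem.List.sorted (PySem.Set.ofList nums) (fun x => x) false)
        (PySem.Int.floordiv (k * (k + 1)) 2) 0]
  dsimp only
  rw [empty_filter_id, empty_update]

  have hperm : (PySem.List.sorted (PySem.Set.ofList nums) (fun x => x) false).Perm
      (PySem.Set.ofList nums) := PySem.List.sorted_perm ..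
  have hfil := hperm.filter (fun x => decide (x ≤ k))
  rw [← hfil.sum_eq, ← hfil.length_eq]
  have hmain := sweep_main k (PySem.Set.ofList nums)
    (PySem.List.sorted (PySem.Set.ofList nums) (fun x => x) false)
    (0 + (((PySem.List.sorted (PySem.Set.ofList nums) (fun x => x) false).filter
        (fun x => decide (x ≤ k))).length : Int))
    (k + 1)
    (PySem.Int.floordiv (k * (k + 1)) 2
      - ((PySem.List.sorted (PySem.Set.ofList nums) (fun x => x) false).filter
          (fun x => decide (x ≤ k))).sum)
    (PySem.List.sorted_ofList_pairwise_lt ..)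
    (fun w hw => (PySem.List.mem_sorted ..).mp hw)
    (fun x hx _ => (PySem.List.mem_sorted ..).mpr hx)
    (by omega)
    le_rfl
    (fun w _ hkw => by omega)
  rw [show k + 1 - 1 = k from by ring] at hmain
  exact hmain
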